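-- pv_equiv track=rewrite | github.com/GiaTrung28/THCS_19A3 | bai10chuong11.py | tim_hang_tong_lon_nhat
-- ===== SOURCE A (Python) =====
-- def tim_hang_tong_lon_nhat(ma_tran):
--     max_tong = None
--     chi_so_hang_max = -1
--
--     for i in range(len(ma_tran)):
--         hang_hien_tai = ma_tran[i]
--         tong_hang = 0
--         for phan_tu in hang_hien_tai:
--             tong_hang += phan_tu
--
--         if max_tong is None or tong_hang > max_tong:
--             max_tong = tong_hang
--             chi_so_hang_max = i
--
--     return chi_so_hang_max, max_tong
-- ===== SOURCE B (Python) =====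
-- def tim_hang_tong_lon_nhat(ma_tran):
--     # Two-pass: materialize the table of row sums, then argmax over indices.
--     sums = [sum(row) for row in ma_tran]
--     if not sums:
--         return -1, None
--     best = max(range(len(sums)), key=lambda i: sums[i])
--     return best, sums[best]
-- ===== Notes on version B (the rewrite author's own statement) =====
-- stated objective: idiomatic
-- what changed: A fuses summing and maximum tracking in one indexed loop with an Optional running max; B first builds the full table of row sums and then selects the argmax with max(range, key=...) in a separate pass.
-- outside the precondition, e.g. on tim_hang_tong_lon_nhat([]): A returns (-1, None), B returns (-1, None)
import Mathlib
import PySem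

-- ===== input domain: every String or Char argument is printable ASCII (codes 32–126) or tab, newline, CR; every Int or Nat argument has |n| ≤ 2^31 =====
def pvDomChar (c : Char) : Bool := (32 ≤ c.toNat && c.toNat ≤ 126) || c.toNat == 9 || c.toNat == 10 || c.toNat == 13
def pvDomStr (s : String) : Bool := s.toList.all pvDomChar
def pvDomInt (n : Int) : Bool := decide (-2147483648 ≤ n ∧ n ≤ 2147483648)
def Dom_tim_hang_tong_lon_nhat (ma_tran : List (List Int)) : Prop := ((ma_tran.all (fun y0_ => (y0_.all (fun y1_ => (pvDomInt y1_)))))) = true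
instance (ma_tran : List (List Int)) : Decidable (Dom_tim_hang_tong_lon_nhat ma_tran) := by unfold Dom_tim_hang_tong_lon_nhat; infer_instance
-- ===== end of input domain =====

-- B replaces A's fused index loop (running Optional max + index) by a two-pass shape:
-- build the table of row sums, then select the argmax in a separate pass (idiomatic, same cost).


-- ===== PORT A =====
def tim_hang_tong_lon_nhat (ma_tran : List (List Int)) : Int × Int :=
  -- state: (max_tong : Option Int, chi_so_hang_max : Int)
  let st := (PySem.List.pyRange 0 ma_tran.length 1).foldl
    (fun (st : Option Int × Int) i =>
      let hang_hien_tai := PySem.List.pyGetD ma_tran i []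
      let tong_hang := hang_hien_tai.foldl (fun a x => a + x) 0
      match st.1 with
      | none => (some tong_hang, i)
      | some m => if tong_hang > m then (some tong_hang, i) else st)
    (none, -1)
  -- max_tong stays None only for the empty matrix (Python returns (-1, None) there,
  -- not an Int × Int value: excluded by Pre_); .getD 0 is a placeholder for that case
  (st.2, st.1.getD 0)

-- ===== PORT B =====
def tim_hang_tong_lon_nhat_alt (ma_tran : List (List Int)) : Int × Int :=
  let sums := ma_tran.map (fun row => row.foldl (fun a x => a + x) 0)
  if sums.isEmpty then (-1, 0)  -- Source B returns (-1, None) here; outside Pre_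
  else
    match PySem.List.max? (PySem.List.pyRange 0 sums.length 1)
        (fun i => PySem.List.pyGetD sums i 0) with
    | some best => (best, PySem.List.pyGetD sums best 0)
    | none => (-1, 0)  -- unreachable: the range is nonempty

-- ===== PRECONDITION & SPEC =====
-- Pre_ excludes only the empty matrix, on which A returns (-1, None): None is not an Int,
-- so that return value is not representable in the declared type Int × Int.
def Pre_tim_hang_tong_lon_nhat (ma_tran : List (List Int)) : Prop := ma_tran ≠ []
instance (ma_tran : List (List Int)) : Decidable (Pre_tim_hang_tong_lon_nhat ma_tran) := by unfold Pre_tim_hang_tong_lon_nhat; infer_instance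
def pvWitness_tim_hang_tong_lon_nhat : List (List Int) := [[1, 2], [5], []]

def Spec_tim_hang_tong_lon_nhat (ma_tran : List (List Int)) (out : Int × Int) : Prop := out = tim_hang_tong_lon_nhat_alt ma_tran
instance (ma_tran : List (List Int)) (out : Int × Int) : Decidable (Spec_tim_hang_tong_lon_nhat ma_tran out) := by unfold Spec_tim_hang_tong_lon_nhat; infer_instance

-- ===== CLAIM (what is proved, stated in full; the proofs are below) =====
def Claim_equal_tim_hang_tong_lon_nhat : Prop := ∀ (ma_tran : List (List Int)), Dom_tim_hang_tong_lon_nhat ma_tran → Pre_tim_hang_tong_lon_nhat ma_tran → Spec_tim_hang_tong_lon_nhat ma_tran (tim_hang_tong_lon_nhat ma_tran)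

-- ===== LEMMAS AND PROOFS =====

/-- A's loop body (running Optional max with its index), with the row sum abstracted as `g i`. -/
def pvStepA (g : Int → Int) (st : Option Int × Int) (i : Int) : Option Int × Int :=
  match st.1 with
  | none => (some (g i), i)
  | some m => if g i > m then (some (g i), i) else st

/-- The fold body of `PySem.List.max?` specialized to key `g`. -/
def pvStepB (g : Int → Int) (acc : Option Int) (x : Int) : Option Int :=
  match acc with
  | none => some x
  | some m => if g m < g x then some x else some m

/-- Translate B's `max?` accumulator into A's (Option running-max, index) pair. -/
def pvPack (g : Int → Int) : Option Int → Option Int × Int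
  | none => (none, -1)
  | some j => (some (g j), j)

/-- A's fused loop is the `pvPack` image of the `max?`-style fold, for any key `g`. -/
theorem pvFold_corr (g : Int → Int) (l : List Int) : ∀ (acc : Option Int),
    l.foldl (pvStepA g) (pvPack g acc) = pvPack g (l.foldl (pvStepB g) acc) := by
  induction l with
  | nil => intro acc; rfl
  | cons i t ih =>
    intro acc
    simp only [List.foldl_cons]
    cases acc with
    | none => exact ih (some i)
    | some j =>
      simp only [pvPack, pvStepA, pvStepB, gt_iff_lt]
      by_cases h : g j < g i
      · simp only [if_pos h]
        have := ih (some i); simp only [pvPack] at this; exact this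
      · simp only [if_neg h]
        have := ih (some j); simp only [pvPack] at this; exact this

theorem pvMax?_eq (l : List Int) (g : Int → Int) :
    PySem.List.max? l g = l.foldl (pvStepB g) none := by
  unfold PySem.List.max?
  congr 1
  funext acc x
  cases acc <;> rfl

theorem tim_hang_tong_lon_nhat_spec : Claim_equal_tim_hang_tong_lon_nhat := by
  intro ma_tran _ hpre
  have hpre' : ma_tran ≠ [] := hpre
  unfold Spec_tim_hang_tong_lon_nhat tim_hang_tong_lon_nhat tim_hang_tong_lon_nhat_alt
  simp only []
  set g : Int → Int :=
    fun i => PySem.List.pyGetD (ma_tran.map (fun row => row.foldl (fun a x => a + x) 0)) i 0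
    with hg
  have hbody : ∀ (i : Int),
      (PySem.List.pyGetD ma_tran i []).foldl (fun a x => a + x) 0 = g i := by
    intro i
    rw [hg]
    exact (PySem.List.pyGetD_map (fun row => row.foldl (fun a x => a + x) 0) ma_tran i []).symm
  have hlen : (ma_tran.map (fun row => row.foldl (fun a x => a + x) 0)).length
      = ma_tran.length := by simp
  have hfoldeq :
      (PySem.List.pyRange 0 ma_tran.length 1).foldl
        (fun (st : Option Int × Int) i =>
          let hang_hien_tai := PySem.List.pyGetD ma_tran i []
          let tong_hang := hang_hien_tai.foldl (fun a x => a + x) 0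
          match st.1 with
          | none => (some tong_hang, i)
          | some m => if tong_hang > m then (some tong_hang, i) else st)
        (none, -1)
      = (PySem.List.pyRange 0 ma_tran.length 1).foldl (pvStepA g) (none, -1) := by
    congr 1
    funext st i
    simp only [hbody, pvStepA]
  have hcorr := pvFold_corr g (PySem.List.pyRange 0 ma_tran.length 1) none
  simp only [pvPack] at hcorr
  rw [hfoldeq, hcorr, ← pvMax?_eq]
  have hempty : (ma_tran.map (fun row => row.foldl (fun a x => a + x) 0)).isEmpty = false := by
    simp [hpre']
  rw [hempty]
  simp only [Bool.false_eq_true, if_false, hlen]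
  have hne : PySem.List.pyRange 0 (ma_tran.length : Int) 1 ≠ [] := by
    intro h
    have := congrArg List.length h
    rw [PySem.List.length_pyRange_one] at this
    simp only [List.length_nil] at this
    have hz : ma_tran.length = 0 := by omega
    exact hpre' (List.eq_nil_of_length_eq_zero hz)
  cases hmx : PySem.List.max? (PySem.List.pyRange 0 (ma_tran.length : Int) 1) g with
  | none => exact absurd ((PySem.List.max?_eq_none_iff _ _).mp hmx) hne
  | some k => rfl

-- ===== VERDICT (by name: the statement is the Claim_ definition above) =====
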